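-- pv_equiv track=rewrite | github.com/xryanglab/RiboCode | RiboCode/orf_finder.py | orf_find
-- ===== SOURCE A (Python) =====
-- def orf_find(start_idx,stop_idx,alt_start_idx,MIN_AA_LENGTH):
-- 	"""
-- 	extract ORFs
-- 	"""
-- 	commonstop_dict = {}
-- 	for f in (0,1,2):
-- 		inframe_stops = [x for x in stop_idx if x%3==f]
-- 		inframe_starts = [x for x in start_idx if x%3==f]
-- 		if alt_start_idx:
-- 			inframe_alt_starts = [x for x in alt_start_idx if x%3==f]
-- 		else:
-- 			inframe_alt_starts = None
--
-- 		last_stop = -1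
-- 		for j in inframe_stops:
-- 			tmp_starts = []
-- 			alt_flag = 1
-- 			if inframe_starts:
-- 				for i in inframe_starts:
-- 					if i < j and i > last_stop and (j-i) >= MIN_AA_LENGTH*3:
-- 						alt_flag = 0
-- 						tmp_starts.append(i)
-- 			if alt_flag and inframe_alt_starts:
-- 				for i in inframe_alt_starts:
-- 					if i < j and i > last_stop and (j-i) >= MIN_AA_LENGTH*3:
-- 						tmp_starts.append(i)
-- 			last_stop = j
-- 			if tmp_starts:
-- 				commonstop_dict[j] = tmp_starts
-- 	return commonstop_dict
-- ===== SOURCE B (Python) =====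
-- from bisect import bisect_right
--
-- def orf_find(start_idx, stop_idx, alt_start_idx, MIN_AA_LENGTH):
--     """
--     extract ORFs: per frame, keep the (value, position) start pairs sorted by value
--     and pull each stop's window of starts out with two binary searches, restoring
--     the original order by the stored positions.
--     """
--     commonstop_dict = {}
--     span = max(1, 3 * MIN_AA_LENGTH)
--     for f in (0, 1, 2):
--         stops = [x for x in stop_idx if x % 3 == f]
--         prim = sorted([(x, p) for p, x in enumerate(start_idx) if x % 3 == f],
--                       key=lambda t: t[0])
--         prim_vals = [t[0] for t in prim]
--         if alt_start_idx:
--             alt = sorted([(x, p) for p, x in enumerate(alt_start_idx) if x % 3 == f],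
--                          key=lambda t: t[0])
--             alt_vals = [t[0] for t in alt]
--         else:
--             alt = None
--             alt_vals = None
--         prev = -1
--         for j in stops:
--             sel = prim[bisect_right(prim_vals, prev):bisect_right(prim_vals, j - span)]
--             if not sel and alt:
--                 sel = alt[bisect_right(alt_vals, prev):bisect_right(alt_vals, j - span)]
--             prev = j
--             if sel:
--                 commonstop_dict[j] = [t[0] for t in sorted(sel, key=lambda t: t[1])]
--     return commonstop_dict
-- ===== Notes on version B (the rewrite author's own statement) =====
-- stated objective: faster
-- what changed: Instead of rescanning every in-frame start for each stop codon, B sorts each frame's (start value, position) pairs by value once and extracts every stop's window (last_stop, stop-max(1,3*MIN)] with two bisect_right binary searches, restoring the original order via the stored positions.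
import Mathlib
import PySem

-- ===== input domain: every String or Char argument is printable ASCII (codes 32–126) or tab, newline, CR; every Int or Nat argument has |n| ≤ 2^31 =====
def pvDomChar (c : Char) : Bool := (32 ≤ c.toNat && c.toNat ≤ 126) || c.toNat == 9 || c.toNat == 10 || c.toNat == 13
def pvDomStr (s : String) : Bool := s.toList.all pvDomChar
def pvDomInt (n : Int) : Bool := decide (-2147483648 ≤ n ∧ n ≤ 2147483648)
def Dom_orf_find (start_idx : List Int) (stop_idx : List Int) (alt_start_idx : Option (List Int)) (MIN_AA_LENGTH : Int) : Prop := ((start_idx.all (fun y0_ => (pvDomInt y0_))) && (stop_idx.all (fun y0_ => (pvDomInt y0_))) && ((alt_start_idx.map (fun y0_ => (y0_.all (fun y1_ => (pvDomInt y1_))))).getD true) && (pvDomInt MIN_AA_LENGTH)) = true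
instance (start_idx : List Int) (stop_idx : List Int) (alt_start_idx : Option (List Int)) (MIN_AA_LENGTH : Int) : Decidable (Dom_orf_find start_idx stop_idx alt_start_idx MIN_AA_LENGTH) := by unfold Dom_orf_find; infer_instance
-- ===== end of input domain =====

-- B keeps each frame's (start value, original position) pairs sorted by value and extracts every
-- stop's window of starts with two binary searches (restoring original order via the positions)
-- instead of rescanning the whole start list for every stop (objective: faster; measured).

-- ===== PORT A =====
def orf_find (start_idx : List Int) (stop_idx : List Int) (alt_start_idx : Option (List Int)) (MIN_AA_LENGTH : Int) : List (Int × List Int) :=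
  let d := [(0:Int),1,2].foldl (fun (d : PySem.Dict Int (List Int)) f =>
    let inframe_stops := stop_idx.filter (fun x => PySem.Int.mod x 3 == f)
    let inframe_starts := start_idx.filter (fun x => PySem.Int.mod x 3 == f)
    let inframe_alt_starts : Option (List Int) :=
      match alt_start_idx with
      | some l => if l.isEmpty then none else some (l.filter (fun x => PySem.Int.mod x 3 == f))
      | none => none
    let st := inframe_stops.foldl (fun (s : Int × PySem.Dict Int (List Int)) j =>
      let last_stop := s.1
      let t0 : List Int × Int :=
        if inframe_starts.isEmpty then ([], 1)
        else inframe_starts.foldl (fun t i =>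
          if i < j ∧ last_stop < i ∧ MIN_AA_LENGTH * 3 ≤ j - i then (t.1 ++ [i], 0) else t) ([], 1)
      let tmp : List Int :=
        if t0.2 ≠ 0 then
          match inframe_alt_starts with
          | some alts =>
            if alts.isEmpty then t0.1
            else alts.foldl (fun t i =>
              if i < j ∧ last_stop < i ∧ MIN_AA_LENGTH * 3 ≤ j - i then t ++ [i] else t) t0.1
          | none => t0.1
        else t0.1
      (j, if tmp.isEmpty then s.2 else s.2.insert j tmp)) (-1, d)
    st.2) PySem.Dict.empty
  d.items

-- ===== PORT B =====
def orf_find_alt (start_idx : List Int) (stop_idx : List Int) (alt_start_idx : Option (List Int)) (MIN_AA_LENGTH : Int) : List (Int × List Int) :=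
  let span := max 1 (3 * MIN_AA_LENGTH)
  let d := [(0:Int),1,2].foldl (fun (d : PySem.Dict Int (List Int)) f =>
    let stops := stop_idx.filter (fun x => PySem.Int.mod x 3 == f)
    let prim := PySem.List.sorted (((PySem.List.enumerate start_idx).filter (fun p => PySem.Int.mod p.2 3 == f)).map (fun p => (p.2, p.1))) (fun t => t.1)
    let prim_vals := prim.map (fun t => t.1)
    let altp : Option (List (Int × Int) × List Int) :=
      match alt_start_idx with
      | some l =>
        if l.isEmpty then none
        else
          let alt := PySem.List.sorted (((PySem.List.enumerate l).filter (fun p => PySem.Int.mod p.2 3 == f)).map (fun p => (p.2, p.1))) (fun t => t.1)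
          some (alt, alt.map (fun t => t.1))
      | none => none
    let st := stops.foldl (fun (s : Int × PySem.Dict Int (List Int)) j =>
      let prev := s.1
      let sel0 := PySem.List.slice prim (some ((PySem.List.bisectRight prim_vals prev : Nat) : Int)) (some ((PySem.List.bisectRight prim_vals (j - span) : Nat) : Int))
      let sel :=
        if sel0.isEmpty then
          match altp with
          | some av =>
            if av.1.isEmpty then sel0
            else PySem.List.slice av.1 (some ((PySem.List.bisectRight av.2 prev : Nat) : Int)) (some ((PySem.List.bisectRight av.2 (j - span) : Nat) : Int))
          | none => sel0
        else sel0
      (j, if sel.isEmpty then s.2 else s.2.insert j ((PySem.List.sorted sel (fun t => t.2)).map (fun t => t.1)))) (-1, d)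
    st.2) PySem.Dict.empty
  d.items

-- ===== PRECONDITION & SPEC =====
def Spec_orf_find (start_idx : List Int) (stop_idx : List Int) (alt_start_idx : Option (List Int)) (MIN_AA_LENGTH : Int) (out : List (Int × List Int)) : Prop := out = orf_find_alt start_idx stop_idx alt_start_idx MIN_AA_LENGTH
instance (start_idx : List Int) (stop_idx : List Int) (alt_start_idx : Option (List Int)) (MIN_AA_LENGTH : Int) (out : List (Int × List Int)) : Decidable (Spec_orf_find start_idx stop_idx alt_start_idx MIN_AA_LENGTH out) := by unfold Spec_orf_find; infer_instance

-- ===== CLAIM (what is proved, stated in full; the proofs are below) =====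
def Claim_equal_orf_find : Prop := ∀ (start_idx : List Int) (stop_idx : List Int) (alt_start_idx : Option (List Int)) (MIN_AA_LENGTH : Int), Dom_orf_find start_idx stop_idx alt_start_idx MIN_AA_LENGTH → Spec_orf_find start_idx stop_idx alt_start_idx MIN_AA_LENGTH (orf_find start_idx stop_idx alt_start_idx MIN_AA_LENGTH)

-- ===== LEMMAS AND PROOFS =====

-- value/position pairs of the in-frame elements, in original order
def pvPairs (f : Int) (xs : List Int) : List (Int × Int) :=
  ((PySem.List.enumerate xs).filter (fun p => PySem.Int.mod p.2 3 == f)).map (fun p => (p.2, p.1))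

-- B's sorted-by-value pair list
def pvPrim (f : Int) (xs : List Int) : List (Int × Int) :=
  PySem.List.sorted (pvPairs f xs) (fun t => t.1)

-- B's window selection, characterised as a filter of the sorted pair list
def pvSel (f : Int) (xs : List Int) (a b : Int) : List (Int × Int) :=
  (pvPrim f xs).filter (fun t => decide (a < t.1 ∧ t.1 ≤ b))

-- A's window, as a filter of the in-frame starts
def pvTmp (f : Int) (xs : List Int) (a b : Int) : List Int :=
  (xs.filter (fun x => PySem.Int.mod x 3 == f)).filter (fun i => decide (a < i ∧ i ≤ b))

lemma take_eq_filter {α : Type} (xs : List α) (n : Nat) (p : α → Bool)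
    (h : ∀ k (hk : k < xs.length), p xs[k] = true ↔ k < n) : xs.take n = xs.filter p := by
  induction xs generalizing n with
  | nil => simp
  | cons x xs ih =>
    cases n with
    | zero =>
      have h0 : p x = false := by
        have := h 0 (by simp)
        simpa using this
      have hrest : xs.filter p = [] := by
        apply List.filter_eq_nil_iff.mpr
        intro a ha
        obtain ⟨k, hk, rfl⟩ := List.mem_iff_getElem.mp ha
        have := h (k+1) (by simpa using Nat.succ_lt_succ hk)
        simp at this
        simpa using this
      simp [h0, hrest]
    | succ n =>
      have h0 : p x = true := by
        have := h 0 (by simp)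
        simpa using this.mpr (Nat.succ_pos n)
      have hih := ih n (fun k hk => by
        have := h (k+1) (by simpa using Nat.succ_lt_succ hk)
        simpa [Nat.succ_lt_succ_iff] using this)
      simp [h0, hih]


lemma slice_bisect (l : List (Int × Int)) (hp : l.Pairwise (fun a b => a.1 ≤ b.1)) (a b : Int) :
    PySem.List.slice l (some ((PySem.List.bisectRight (l.map (fun t => t.1)) a : Nat) : Int))
      (some ((PySem.List.bisectRight (l.map (fun t => t.1)) b : Nat) : Int))
    = l.filter (fun t => decide (a < t.1 ∧ t.1 ≤ b)) := by
  have hv : (l.map (fun t => t.1)).Pairwise (fun a b => a ≤ b) := List.pairwise_map.mpr hp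
  obtain ⟨hlea, hIa, hJa⟩ := PySem.List.bisectRight_spec (l.map (fun t => t.1)) a hv
  obtain ⟨hleb, hIb, hJb⟩ := PySem.List.bisectRight_spec (l.map (fun t => t.1)) b hv
  set lo := PySem.List.bisectRight (l.map (fun t => t.1)) a with hlo
  set hi := PySem.List.bisectRight (l.map (fun t => t.1)) b with hhi
  simp only [List.length_map] at hlea hleb
  have hval : ∀ (k : Nat) (hk : k < l.length), (l.map (fun t => t.1))[k]'(by simpa using hk) = l[k].1 := by
    intro k hk; simp
  rw [PySem.List.slice_natCast]
  have h2 : ∀ t ∈ l.drop lo, a < t.1 := by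
    intro t ht
    obtain ⟨k, hk, rfl⟩ := List.mem_iff_getElem.mp ht
    rw [List.getElem_drop]
    have hlk : lo + k < l.length := by
      have := hk; simp [List.length_drop] at this; omega
    have := hJa (lo + k) (by simpa using hlk) (Nat.le_add_right _ _)
    rwa [hval (lo + k) hlk] at this
  have htake : (l.drop lo).take (hi - lo) = (l.drop lo).filter (fun t => decide (t.1 ≤ b)) := by
    apply take_eq_filter
    intro k hk
    have hlk : lo + k < l.length := by
      simp [List.length_drop] at hk; omega
    rw [List.getElem_drop]
    constructor
    · intro hle
      simp at hle
      by_contra hcon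
      have hge : hi ≤ lo + k := by omega
      have := hJb (lo + k) (by simpa using hlk) hge
      rw [hval (lo + k) hlk] at this
      omega
    · intro hlt
      have := hIb (lo + k) (by simpa using hlk) (by omega)
      rw [hval (lo + k) hlk] at this
      simpa using this
  conv_rhs => rw [← List.take_append_drop lo l, List.filter_append]
  have h1 : (l.take lo).filter (fun t => decide (a < t.1 ∧ t.1 ≤ b)) = [] := by
    apply List.filter_eq_nil_iff.mpr
    intro t ht
    obtain ⟨k, hk, rfl⟩ := List.mem_iff_getElem.mp ht
    have hkl : k < l.length := by
      simp [List.length_take] at hk; omega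
    have hklo : k < lo := by simp [List.length_take] at hk; omega
    rw [List.getElem_take]
    have := hIa k (by simpa using hkl) hklo
    rw [hval k hkl] at this
    simp; omega
  have h3 : (l.drop lo).filter (fun t => decide (a < t.1 ∧ t.1 ≤ b))
      = (l.drop lo).filter (fun t => decide (t.1 ≤ b)) := by
    apply List.filter_congr
    intro t ht
    have := h2 t ht
    simp [this]
  rw [h1, h3, htake]
  simp


lemma map_snd_filter_enumerate (xs : List Int) (q : Int → Bool) : ∀ s : Int,
    (((PySem.List.enumerate xs s).filter (fun p => q p.2)).map (fun p => p.2)) = xs.filter q := by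
  induction xs with
  | nil => intro s; simp [PySem.List.enumerate_nil]
  | cons x xs ih =>
    intro s
    rw [PySem.List.enumerate_cons]
    by_cases hq : q x = true
    · simp [hq, ih]
    · simp at hq
      simp [hq, ih]


lemma pairs_pairwise (f : Int) (xs : List Int) : (pvPairs f xs).Pairwise (fun a b => a.2 < b.2) := by
  unfold pvPairs
  rw [List.pairwise_map]
  exact (PySem.List.pairwise_lt_enumerate xs 0).filter _


lemma sel_slice_eq (f : Int) (xs : List Int) (a b : Int) :
    PySem.List.slice (pvPrim f xs) (some ((PySem.List.bisectRight ((pvPrim f xs).map (fun t => t.1)) a : Nat) : Int))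
      (some ((PySem.List.bisectRight ((pvPrim f xs).map (fun t => t.1)) b : Nat) : Int)) = pvSel f xs a b := by
  unfold pvSel pvPrim
  exact slice_bisect _ (PySem.List.sorted_pairwise (pvPairs f xs) (fun t => t.1)) a b


lemma sel_sorted_map (f : Int) (xs : List Int) (a b : Int) :
    (PySem.List.sorted (pvSel f xs a b) (fun t => t.2)).map (fun t => t.1) = pvTmp f xs a b := by
  have hperm : ((pvPairs f xs).filter (fun t => decide (a < t.1 ∧ t.1 ≤ b))).Perm (pvSel f xs a b) :=
    ((PySem.List.sorted_perm (pvPairs f xs) (fun t => t.1) false).filter _).symm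
  have hpw : ((pvPairs f xs).filter (fun t => decide (a < t.1 ∧ t.1 ≤ b))).Pairwise (fun p q => p.2 < q.2) :=
    (pairs_pairwise f xs).filter _
  rw [PySem.List.sorted_eq_of_perm_of_pairwise_lt _ _ _ hperm hpw]
  unfold pvPairs pvTmp
  rw [List.filter_map, List.map_map, List.filter_filter]
  simp only [Function.comp]
  rw [List.filter_filter, ← map_snd_filter_enumerate xs _ 0]
  rfl


lemma sel_isEmpty (f : Int) (xs : List Int) (a b : Int) :
    (pvSel f xs a b).isEmpty = (pvTmp f xs a b).isEmpty := by
  have h : (pvSel f xs a b).length = (pvTmp f xs a b).length := by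
    rw [← sel_sorted_map f xs a b]
    simp [PySem.List.length_sorted]
  rw [Bool.eq_iff_iff]
  simp only [List.isEmpty_iff_length_eq_zero, h]


lemma prim_isEmpty (f : Int) (xs : List Int) :
    (pvPrim f xs).isEmpty = (xs.filter (fun x => PySem.Int.mod x 3 == f)).isEmpty := by
  have h : (pvPrim f xs).length = (xs.filter (fun x => PySem.Int.mod x 3 == f)).length := by
    rw [← map_snd_filter_enumerate xs (fun x => PySem.Int.mod x 3 == f) 0]
    unfold pvPrim
    rw [(PySem.List.sorted_perm (pvPairs f xs) (fun t => t.1) false).length_eq]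
    unfold pvPairs
    simp
  rw [Bool.eq_iff_iff]
  simp only [List.isEmpty_iff_length_eq_zero, h]


lemma foldA_inner (j prev M : Int) (l : List Int) : ∀ (acc : List Int) (flag : Int),
    l.foldl (fun t i => if i < j ∧ prev < i ∧ M * 3 ≤ j - i then (t.1 ++ [i], (0:Int)) else t) (acc, flag)
    = (acc ++ l.filter (fun i => decide (i < j ∧ prev < i ∧ M * 3 ≤ j - i)),
       if (l.filter (fun i => decide (i < j ∧ prev < i ∧ M * 3 ≤ j - i))).isEmpty then flag else 0) := by
  induction l with
  | nil => intro acc flag; simp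
  | cons x l ih =>
    intro acc flag
    by_cases hx : x < j ∧ prev < x ∧ M * 3 ≤ j - x
    · simp only [List.foldl_cons, if_pos hx, ih]
      simp [hx]
    · simp only [List.foldl_cons, if_neg hx, ih]
      simp [hx]


lemma cond_filter_eq (j prev M : Int) (l : List Int) :
    l.filter (fun i => decide (i < j ∧ prev < i ∧ M * 3 ≤ j - i))
    = l.filter (fun i => decide (prev < i ∧ i ≤ j - max 1 (3 * M))) := by
  apply List.filter_congr
  intro i _
  simp only [decide_eq_decide]
  omega


lemma sel_slice_lit (f : Int) (xs : List Int) (a b : Int) :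
    PySem.List.slice
      (PySem.List.sorted (((PySem.List.enumerate xs).filter (fun p => PySem.Int.mod p.2 3 == f)).map (fun p => (p.2, p.1))) (fun t => t.1))
      (some ((PySem.List.bisectRight ((PySem.List.sorted (((PySem.List.enumerate xs).filter (fun p => PySem.Int.mod p.2 3 == f)).map (fun p => (p.2, p.1))) (fun t => t.1)).map (fun t => t.1)) a : Nat) : Int))
      (some ((PySem.List.bisectRight ((PySem.List.sorted (((PySem.List.enumerate xs).filter (fun p => PySem.Int.mod p.2 3 == f)).map (fun p => (p.2, p.1))) (fun t => t.1)).map (fun t => t.1)) b : Nat) : Int))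
    = pvSel f xs a b := sel_slice_eq f xs a b

lemma prim_isEmpty_lit (f : Int) (xs : List Int) :
    (PySem.List.sorted (((PySem.List.enumerate xs).filter (fun p => PySem.Int.mod p.2 3 == f)).map (fun p => (p.2, p.1))) (fun t => t.1)).isEmpty
    = (xs.filter (fun x => PySem.Int.mod x 3 == f)).isEmpty := prim_isEmpty f xs

-- per-stop step equality, stated over the zeta-reduced step functions
lemma step_eq (start_idx : List Int) (alt_start_idx : Option (List Int)) (M f : Int)
    (s : Int × PySem.Dict Int (List Int)) (j : Int) :
    (j, (fun (tmp : List Int) => if tmp.isEmpty = true then s.2 else s.2.insert j tmp)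
      ((fun (t0 : List Int × Int) =>
        if t0.2 ≠ 0 then
          match (match alt_start_idx with
            | some l => if l.isEmpty = true then none else some (l.filter (fun x => PySem.Int.mod x 3 == f))
            | none => none) with
          | some alts =>
            if alts.isEmpty = true then t0.1
            else alts.foldl (fun t i => if i < j ∧ s.1 < i ∧ M * 3 ≤ j - i then t ++ [i] else t) t0.1
          | none => t0.1
        else t0.1)
        (if (start_idx.filter (fun x => PySem.Int.mod x 3 == f)).isEmpty = true then (([]:List Int), (1:Int))
         else (start_idx.filter (fun x => PySem.Int.mod x 3 == f)).foldl
          (fun t i => if i < j ∧ s.1 < i ∧ M * 3 ≤ j - i then (t.1 ++ [i], (0:Int)) else t) ([], 1))))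
    =
    (j, (fun (sel : List (Int × Int)) => if sel.isEmpty = true then s.2
          else s.2.insert j ((PySem.List.sorted sel (fun t => t.2)).map (fun t => t.1)))
      ((fun (sel0 : List (Int × Int)) =>
        if sel0.isEmpty = true then
          match ((match alt_start_idx with
            | some l =>
              if l.isEmpty = true then none
              else some (PySem.List.sorted (((PySem.List.enumerate l).filter (fun p => PySem.Int.mod p.2 3 == f)).map (fun p => (p.2, p.1))) (fun t => t.1),
                         (PySem.List.sorted (((PySem.List.enumerate l).filter (fun p => PySem.Int.mod p.2 3 == f)).map (fun p => (p.2, p.1))) (fun t => t.1)).map (fun t => t.1))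
            | none => none) : Option (List (Int × Int) × List Int)) with
          | some av =>
            if av.1.isEmpty = true then sel0
            else PySem.List.slice av.1 (some ((PySem.List.bisectRight av.2 s.1 : Nat) : Int))
                  (some ((PySem.List.bisectRight av.2 (j - max 1 (3 * M)) : Nat) : Int))
          | none => sel0
        else sel0)
        (PySem.List.slice
          (PySem.List.sorted (((PySem.List.enumerate start_idx).filter (fun p => PySem.Int.mod p.2 3 == f)).map (fun p => (p.2, p.1))) (fun t => t.1))
          (some ((PySem.List.bisectRight ((PySem.List.sorted (((PySem.List.enumerate start_idx).filter (fun p => PySem.Int.mod p.2 3 == f)).map (fun p => (p.2, p.1))) (fun t => t.1)).map (fun t => t.1)) s.1 : Nat) : Int))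
          (some ((PySem.List.bisectRight ((PySem.List.sorted (((PySem.List.enumerate start_idx).filter (fun p => PySem.Int.mod p.2 3 == f)).map (fun p => (p.2, p.1))) (fun t => t.1)).map (fun t => t.1)) (j - max 1 (3 * M)) : Nat) : Int)))))
    := by
  refine congrArg (Prod.mk j) ?_
  beta_reduce
  rw [sel_slice_lit]
  have ht0 : (if (start_idx.filter (fun x => PySem.Int.mod x 3 == f)).isEmpty = true then (([]:List Int), (1:Int))
      else (start_idx.filter (fun x => PySem.Int.mod x 3 == f)).foldl
        (fun t i => if i < j ∧ s.1 < i ∧ M * 3 ≤ j - i then (t.1 ++ [i], (0:Int)) else t) ([], 1))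
      = ((start_idx.filter (fun x => PySem.Int.mod x 3 == f)).filter (fun i => decide (i < j ∧ s.1 < i ∧ M * 3 ≤ j - i)),
         if ((start_idx.filter (fun x => PySem.Int.mod x 3 == f)).filter (fun i => decide (i < j ∧ s.1 < i ∧ M * 3 ≤ j - i))).isEmpty = true then 1 else 0) := by
    by_cases he : (start_idx.filter (fun x => PySem.Int.mod x 3 == f)).isEmpty = true
    · rw [if_pos he, List.isEmpty_iff.mp he]; simp
    · rw [if_neg he, foldA_inner]; simp
  rw [ht0]
  dsimp only
  have hPP : (start_idx.filter (fun x => PySem.Int.mod x 3 == f)).filter (fun i => decide (i < j ∧ s.1 < i ∧ M * 3 ≤ j - i))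
      = pvTmp f start_idx s.1 (j - max 1 (3 * M)) := cond_filter_eq j s.1 M _
  have hse : (pvSel f start_idx s.1 (j - max 1 (3 * M))).isEmpty
      = ((start_idx.filter (fun x => PySem.Int.mod x 3 == f)).filter (fun i => decide (i < j ∧ s.1 < i ∧ M * 3 ≤ j - i))).isEmpty := by
    rw [sel_isEmpty, hPP]
  by_cases hP : ((start_idx.filter (fun x => PySem.Int.mod x 3 == f)).filter (fun i => decide (i < j ∧ s.1 < i ∧ M * 3 ≤ j - i))).isEmpty = true
  · -- primary window empty: both fall back to the alternative starts
    rw [if_pos hP, if_pos (show (1:Int) ≠ 0 by norm_num), hse, if_pos hP]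
    rcases alt_start_idx with _ | l
    · dsimp only
      rw [hse, if_pos hP, if_pos hP]
    · dsimp only
      by_cases hl : l.isEmpty = true
      · simp only [hl, if_true]
        rw [hse, if_pos hP, if_pos hP]
      · simp only [hl, if_false, Bool.false_eq_true]
        rw [prim_isEmpty_lit]
        by_cases hal : (l.filter (fun x => PySem.Int.mod x 3 == f)).isEmpty = true
        · rw [if_pos hal, if_pos hal, hse, if_pos hP, if_pos hP]
        · rw [if_neg hal, if_neg hal, PySem.List.foldl_append_ite_eq_filter, sel_slice_lit,
            List.isEmpty_iff.mp hP, List.nil_append]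
          have hPPa : (l.filter (fun x => PySem.Int.mod x 3 == f)).filter (fun i => decide (i < j ∧ s.1 < i ∧ M * 3 ≤ j - i))
              = pvTmp f l s.1 (j - max 1 (3 * M)) := cond_filter_eq j s.1 M _
          have hsea : (pvSel f l s.1 (j - max 1 (3 * M))).isEmpty
              = ((l.filter (fun x => PySem.Int.mod x 3 == f)).filter (fun i => decide (i < j ∧ s.1 < i ∧ M * 3 ≤ j - i))).isEmpty := by
            rw [sel_isEmpty, hPPa]
          rw [hPPa, ← sel_sorted_map f l s.1 (j - max 1 (3 * M)), hsea, hPPa, ← sel_sorted_map f l s.1 (j - max 1 (3 * M))]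
  · -- primary window nonempty: both keep it
    rw [if_neg hP, if_neg (show ¬((0:Int) ≠ 0) by norm_num), hse, if_neg hP, if_neg hP, hse,
      if_neg hP, hPP, ← sel_sorted_map f start_idx s.1 (j - max 1 (3 * M))]

-- ===== VERDICT (by name: the statement is the Claim_ definition above) =====
theorem orf_find_spec : Claim_equal_orf_find := by
  intro start_idx stop_idx alt_start_idx M _
  unfold Spec_orf_find
  dsimp only [orf_find, orf_find_alt]
  refine congrArg (fun F => (List.foldl F PySem.Dict.empty [(0:Int),1,2]).items) ?_
  funext d f
  refine congrArg Prod.snd ?_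
  refine congrArg (fun g => List.foldl g ((-1:Int), d) (stop_idx.filter (fun x => PySem.Int.mod x 3 == f))) ?_
  funext s j
  exact step_eq start_idx alt_start_idx M f s j
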